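-- pv_equiv track=rewrite | github.com/adebiyiebun/CT-SatSolver | wvbw15.py | getVars
-- ===== SOURCE A (Python) =====
-- def getVars(clause_set):  #finds all literals in clause_set
--     literals=[]
--     for clause in clause_set:
--         for literal in clause:
--             if literal < 0 and (-1*literal) not in literals:
--                 literals.append(int((-1*literal)))
--             elif literal > 0 and literal not in literals:
--                 literals.append(int(literal))
--     return literals
-- ===== SOURCE B (Python) =====
-- def getVars(clause_set):  # flatten, then dedup by peeling: emit head, filter out its copies, repeat
--     stream = [int(abs(l)) for clause in clause_set for l in clause if l != 0]
--     out = []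
--     while stream:
--         v = stream[0]
--         out.append(v)
--         stream = [x for x in stream[1:] if x != v]
--     return out
-- ===== Notes on version B (the rewrite author's own statement) =====
-- stated objective: alternative
-- what changed: A's fused loop that tests membership of each literal in the growing output is replaced by a staged algorithm: flatten all nonzero |literals| into one stream, then deduplicate by peeling - repeatedly emit the stream's head and filter every copy of it out of the remainder - so no membership test is ever performed.
import Mathlib
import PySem

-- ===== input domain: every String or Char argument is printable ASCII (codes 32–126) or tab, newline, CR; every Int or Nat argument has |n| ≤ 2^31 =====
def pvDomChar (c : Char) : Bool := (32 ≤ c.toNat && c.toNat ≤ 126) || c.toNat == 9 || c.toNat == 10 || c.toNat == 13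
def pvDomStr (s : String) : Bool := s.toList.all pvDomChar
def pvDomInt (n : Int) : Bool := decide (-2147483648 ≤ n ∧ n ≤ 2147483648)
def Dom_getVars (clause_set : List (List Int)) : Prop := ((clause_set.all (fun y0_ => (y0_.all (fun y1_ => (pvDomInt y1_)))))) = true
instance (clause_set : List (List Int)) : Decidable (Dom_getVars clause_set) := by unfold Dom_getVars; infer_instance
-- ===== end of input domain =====

-- B replaces A's fused loop with inline membership scan by a flatten pass plus a
-- dedup-by-peeling phase (emit the head, filter its copies out, repeat); objective: alternative.

-- ===== PORT A =====
-- inner loop body of A, one literal at a time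
def getVarsStep (literals : List Int) (literal : Int) : List Int :=
  if literal < 0 ∧ (-1 * literal) ∉ literals then literals ++ [(-1 * literal)]
  else if literal > 0 ∧ literal ∉ literals then literals ++ [literal]
  else literals

def getVars (clause_set : List (List Int)) : List Int :=
  clause_set.foldl (fun literals clause => clause.foldl getVarsStep literals) []

-- ===== PORT B =====
-- the while loop of Source B: emit stream[0], continue on the remainder with its copies
-- filtered out; fuel = initial stream length bounds the iterations (each one shortens
-- the stream), making the recursion structural
def getVarsPeel : Nat → List Int → List Int
  | _, [] => []
  | 0, _ :: _ => []
  | Nat.succ n, v :: rest => v :: getVarsPeel n (rest.filter (fun x => x ≠ v))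

def getVars_alt (clause_set : List (List Int)) : List Int :=
  let stream := clause_set.flatMap (fun clause =>
    (clause.filter (fun l => l ≠ 0)).map (fun l => |l|))
  getVarsPeel stream.length stream

-- ===== PRECONDITION & SPEC =====
def Spec_getVars (clause_set : List (List Int)) (out : List Int) : Prop := out = getVars_alt clause_set
instance (clause_set : List (List Int)) (out : List Int) : Decidable (Spec_getVars clause_set out) := by unfold Spec_getVars; infer_instance

-- ===== CLAIM (what is proved, stated in full; the proofs are below) =====
def Claim_equal_getVars : Prop := ∀ (clause_set : List (List Int)), Dom_getVars clause_set → Spec_getVars clause_set (getVars clause_set)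

-- ===== LEMMAS AND PROOFS =====
theorem getVarsStep_eq_add (literals : List Int) (literal : Int) :
    getVarsStep literals literal =
      if literal ≠ 0 then PySem.Set.add literals |literal| else literals := by
  unfold getVarsStep PySem.Set.add PySem.Set.contains
  rcases lt_trichotomy literal 0 with h | h | h
  · simp [h, abs_of_neg h, not_lt.mpr h.le]
    omega
  · simp [h]
  · simp [h, abs_of_pos h, not_lt.mpr h.le]
    omega

theorem foldl_step_eq_update (clause : List Int) (literals : List Int) :
    clause.foldl getVarsStep literals =
      PySem.Set.update literals ((clause.filter (fun l => l ≠ 0)).map (fun l => |l|)) := by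
  induction clause generalizing literals with
  | nil => rfl
  | cons l rest ih =>
    by_cases h : l = 0
    · simp [h, getVarsStep_eq_add, PySem.Set.update, ih]
    · simp [h, getVarsStep_eq_add, PySem.Set.update, ih]

theorem getVars_fold (clause_set : List (List Int)) (s : List Int) :
    clause_set.foldl (fun literals clause => clause.foldl getVarsStep literals) s =
      PySem.Set.update s (clause_set.flatMap (fun clause =>
        (clause.filter (fun l => l ≠ 0)).map (fun l => |l|))) := by
  induction clause_set generalizing s with
  | nil => rfl
  | cons c rest ih =>
    simp only [List.foldl_cons, List.flatMap_cons]
    rw [ih, foldl_step_eq_update]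
    simp [PySem.Set.update, List.foldl_append]

theorem getVars_eq_ofList (clause_set : List (List Int)) :
    getVars clause_set =
      PySem.Set.ofList (clause_set.flatMap (fun clause =>
        (clause.filter (fun l => l ≠ 0)).map (fun l => |l|))) := by
  unfold getVars
  rw [getVars_fold]
  rfl

theorem discard_eq_filter (s : List Int) (x : Int) :
    PySem.Set.discard s x = s.filter (fun y => y ≠ x) := by
  simp only [PySem.Set.discard]
  exact List.filter_congr (fun a _ => by by_cases h : a = x <;> simp [h])

theorem ofList_filter (l : List Int) (x : Int) :
    PySem.Set.ofList (l.filter (fun y => y ≠ x)) =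
      (PySem.Set.ofList l).filter (fun y => y ≠ x) := by
  induction l with
  | nil => rfl
  | cons y l ih =>
    rw [PySem.Set.ofList_cons, discard_eq_filter]
    by_cases h : y = x
    · subst h
      rw [List.filter_cons_of_neg (by simp), ih]
      simp [List.filter_filter]
    · rw [List.filter_cons_of_pos (by simp [h]), PySem.Set.ofList_cons,
        discard_eq_filter, ih]
      simp only [List.filter_cons, decide_not]
      simp [h, List.filter_filter]
      exact List.filter_congr (fun a _ => by
        by_cases h1 : a = x <;> by_cases h2 : a = y <;> simp_all)

theorem peel_eq_ofList : ∀ (n : Nat) (l : List Int), l.length ≤ n →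
    getVarsPeel n l = PySem.Set.ofList l := by
  intro n
  induction n with
  | zero =>
    intro l hl
    have h : l = [] := by cases l <;> simp_all
    subst h
    rfl
  | succ n ih =>
    intro l hl
    match l with
    | [] => rfl
    | v :: rest =>
      have hrest : (rest.filter (fun x => x ≠ v)).length ≤ n :=
        le_trans (List.length_filter_le _ _) (by simp at hl; omega)
      simp only [getVarsPeel]
      rw [ih _ hrest, ofList_filter, PySem.Set.ofList_cons, discard_eq_filter]

-- ===== VERDICT (by name: the statement is the Claim_ definition above) =====
theorem getVars_spec : Claim_equal_getVars := by
  intro cs _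
  unfold Spec_getVars getVars_alt
  rw [getVars_eq_ofList, peel_eq_ofList _ _ (Nat.le_refl _)]
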